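-- pv_equiv track=rewrite | github.com/danchendrickson/RMG_NDE_Disssertation | FingerprintML/Stationary3DFP.py | split_list_by_zeros
-- ===== SOURCE A (Python) =====
-- def split_list_by_zeros(original_list, ones_list):
--     # modified split_list_by_ones function to instead split by the zeros.
--     #
--     #
--     # Created with Bing AI support
--     #  1st request: "python split list into chunks based on value"
--     #  2nd request: "I want to split the list based on the values in a second list.  Second list is all 1s and 0s.  I want all 0s removed, and each set of consequtive ones as its own item"
--     #  3rd request: "That is close.  Here is an example of the two lists, and what I would want returned: original_list = [1, 2, 3, 8, 7, 4, 5, 6, 4, 7, 8, 9]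
--     #                ones_list =     [1, 1, 1, 1, 0, 1, 1, 1, 0, 0, 1, 1]
--     #                return: [[1, 2, 3, 8], [4, 5, 6], [8,9]]"
--     #
--     #This is the function that was created and seems to work on the short lists, going to use for long lists
--
--     result_sublists = []
--     sublist = []
--
--     for val, is_one in zip(original_list, ones_list):
--         if not is_one:
--             sublist.append(val)
--         elif sublist:
--             result_sublists.append(sublist)
--             sublist = []
--
--     # Add the last sublist (if any)
--     if sublist:
--         result_sublists.append(sublist)
--
--     return result_sublists
-- ===== SOURCE B (Python) =====
-- from itertools import groupby
--
--
-- def split_list_by_zeros(original_list, ones_list):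
--     # Group zip(original, mask) into maximal runs of equal mask-truthiness;
--     # keep exactly the runs whose mask values are falsy.
--     return [[v for v, _ in grp]
--             for is_zero, grp in groupby(zip(original_list, ones_list),
--                                         key=lambda p: not p[1])
--             if is_zero]
-- ===== Notes on version B (the rewrite author's own statement) =====
-- stated objective: idiomatic
-- what changed: Replaces the manual accumulator with flush-at-boundary/flush-at-end logic by itertools.groupby over the zipped pairs keyed on mask falsiness, keeping each falsy-mask run as one chunk.
import Mathlib
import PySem

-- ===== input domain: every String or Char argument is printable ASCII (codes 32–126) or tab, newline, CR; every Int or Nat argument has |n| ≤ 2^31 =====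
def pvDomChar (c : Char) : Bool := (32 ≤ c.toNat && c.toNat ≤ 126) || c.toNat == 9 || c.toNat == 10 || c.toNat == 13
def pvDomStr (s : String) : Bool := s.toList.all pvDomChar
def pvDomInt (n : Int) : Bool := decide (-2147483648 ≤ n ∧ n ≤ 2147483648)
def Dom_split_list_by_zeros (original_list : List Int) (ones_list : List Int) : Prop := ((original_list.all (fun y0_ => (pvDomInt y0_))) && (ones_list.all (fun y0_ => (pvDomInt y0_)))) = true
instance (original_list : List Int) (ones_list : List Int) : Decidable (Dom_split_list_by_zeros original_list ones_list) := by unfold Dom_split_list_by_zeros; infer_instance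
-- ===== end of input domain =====

-- B replaces A's manual accumulator/flush loop by a groupby-style run decomposition (idiomatic; same O(n) cost).


-- ===== PORT A =====
-- loop body: 'if not is_one: sublist.append(val) elif sublist: flush'
def pvStepA (st : List (List Int) × List Int) (vi : Int × Int) : List (List Int) × List Int :=
  if vi.2 == 0 then (st.1, st.2 ++ [vi.1])
  else if st.2 ≠ [] then (st.1 ++ [st.2], ([] : List Int))
  else st

-- the final 'if sublist: result_sublists.append(sublist)'
def pvFinishA (p : List (List Int) × List Int) : List (List Int) :=
  if p.2 ≠ [] then p.1 ++ [p.2] else p.1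

def split_list_by_zeros (original_list : List Int) (ones_list : List Int) : List (List Int) :=
  pvFinishA ((original_list.zip ones_list).foldl pvStepA ([], []))

-- ===== PORT B =====
-- port of B's groupby: each maximal run of mask-zero pairs becomes one chunk
def pvGroups : List (Int × Int) → List (List Int)
  | [] => []
  | (v, m) :: rest =>
    if m == 0 then
      (v :: (rest.takeWhile (fun vi => vi.2 == 0)).map Prod.fst)
        :: pvGroups (rest.dropWhile (fun vi => vi.2 == 0))
    else pvGroups rest
termination_by l => l.length
decreasing_by
  · exact Nat.lt_succ_of_le (List.length_dropWhile_le _ _)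
  · simp

def split_list_by_zeros_alt (original_list : List Int) (ones_list : List Int) : List (List Int) :=
  pvGroups (original_list.zip ones_list)

-- ===== PRECONDITION & SPEC =====
def Spec_split_list_by_zeros (original_list : List Int) (ones_list : List Int) (out : List (List Int)) : Prop := out = split_list_by_zeros_alt original_list ones_list
instance (original_list : List Int) (ones_list : List Int) (out : List (List Int)) : Decidable (Spec_split_list_by_zeros original_list ones_list out) := by unfold Spec_split_list_by_zeros; infer_instance

-- ===== CLAIM =====
def Claim_equal_split_list_by_zeros : Prop := ∀ (original_list : List Int) (ones_list : List Int), Dom_split_list_by_zeros original_list ones_list → Spec_split_list_by_zeros original_list ones_list (split_list_by_zeros original_list ones_list)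

-- ===== LEMMAS AND PROOFS =====
theorem pvGroups_nil : pvGroups [] = [] := by rw [pvGroups]

theorem pvGroups_cons (v m : Int) (rest : List (Int × Int)) :
    pvGroups ((v, m) :: rest) =
      if m == 0 then
        (v :: (rest.takeWhile (fun vi => vi.2 == 0)).map Prod.fst)
          :: pvGroups (rest.dropWhile (fun vi => vi.2 == 0))
      else pvGroups rest := by
  rw [pvGroups]

-- pvG cur l: A's remaining computation given current open sublist cur
def pvG (cur : List Int) : List (Int × Int) → List (List Int)
  | [] => if cur ≠ [] then [cur] else []
  | (v, m) :: rest =>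
    if m == 0 then pvG (cur ++ [v]) rest
    else (if cur ≠ [] then [cur] else []) ++ pvG [] rest

theorem pvG_foldl (l : List (Int × Int)) : ∀ (acc : List (List Int)) (cur : List Int),
    pvFinishA (l.foldl pvStepA (acc, cur)) = acc ++ pvG cur l := by
  induction l with
  | nil =>
    intro acc cur
    simp only [List.foldl, pvFinishA, pvG]
    split <;> simp
  | cons hd tl ih =>
    intro acc cur
    obtain ⟨v, m⟩ := hd
    simp only [List.foldl]
    by_cases hm : m == 0
    · have : pvStepA (acc, cur) (v, m) = (acc, cur ++ [v]) := by simp [pvStepA, hm]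
      rw [this, ih, pvG]
      simp [hm]
    · by_cases hc : cur = []
      · have : pvStepA (acc, cur) (v, m) = (acc, cur) := by simp [pvStepA, hm, hc]
        rw [this, ih, pvG]
        simp [hm, hc]
      · have : pvStepA (acc, cur) (v, m) = (acc ++ [cur], []) := by simp [pvStepA, hm, hc]
        rw [this, ih, pvG]
        simp [hm, hc]

theorem pvG_groups (l : List (Int × Int)) : ∀ (cur : List Int),
    pvG cur l = if cur = [] then pvGroups l
      else (cur ++ (l.takeWhile (fun vi => vi.2 == 0)).map Prod.fst)
        :: pvGroups (l.dropWhile (fun vi => vi.2 == 0)) := by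
  induction l with
  | nil =>
    intro cur
    by_cases hc : cur = [] <;> simp [pvG, pvGroups_nil, hc]
  | cons hd tl ih =>
    intro cur
    obtain ⟨v, m⟩ := hd
    rw [pvG, pvGroups_cons]
    by_cases hm : m == 0
    · by_cases hc : cur = []
      · simp [hm, hc, ih]
      · simp [hm, hc, ih]
    · by_cases hc : cur = []
      · simp [hm, hc, ih]
      · have h1 : pvG ([] : List Int) tl = pvGroups tl := by simp [ih]
        simp [hm, hc, h1, List.takeWhile_cons, List.dropWhile_cons, pvGroups_cons]

-- ===== VERDICT =====
theorem split_list_by_zeros_spec : Claim_equal_split_list_by_zeros := by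
  intro o l _
  unfold Spec_split_list_by_zeros split_list_by_zeros split_list_by_zeros_alt
  rw [pvG_foldl (o.zip l) [] [], pvG_groups]
  simp
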